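-- pv_equiv track=rewrite | github.com/ACumika/Personal_Projects | Bachelors/Programming/2018_Python (Intro to Algorithms)/ForLoop Lab.py | jscore
-- ===== SOURCE A (Python) =====
-- def jscore(S,T):
--         S=str(S)
--         T=str(T)
--         characters="QWERTYUIOPASDFGHJKLZXCVBNMqwertyuiopasdfghjklzxcvbnm1234567890!@#$%^&*()_+[]'/{}?.,<>`~=-"
--         ls=len(characters)
--         count=0
--         for i in range(ls):
--                 character=characters[i]
--                 cS=S.count(character)
--                 cT=T.count(character)
--                 if cS<=cT:
--                         count=count+cS
--                 else:
--                         count=count+cT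
--         return count
-- ===== SOURCE B (Python) =====
-- def jscore(S, T):
--     S = str(S)
--     T = str(T)
--     allowed = set("QWERTYUIOPASDFGHJKLZXCVBNMqwertyuiopasdfghjklzxcvbnm1234567890!@#$%^&*()_+[]'/{}?.,<>`~=-")
--     cS = {}
--     for ch in S:
--         if ch in allowed:
--             cS[ch] = cS.get(ch, 0) + 1
--     cT = {}
--     for ch in T:
--         if ch in allowed:
--             cT[ch] = cT.get(ch, 0) + 1
--     return sum(min(v, cT.get(ch, 0)) for ch, v in cS.items())
-- ===== Notes on version B (the rewrite author's own statement) =====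
-- stated objective: alternative
-- what changed: A scans S and T once per character of the fixed 92-character alphabet (92 substring-count passes over each string, with an explicit min branch); B instead makes a single counting pass over each string, building a dict of counts restricted to the alphabet, and sums the minima over the characters actually present in S.
import Mathlib
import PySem

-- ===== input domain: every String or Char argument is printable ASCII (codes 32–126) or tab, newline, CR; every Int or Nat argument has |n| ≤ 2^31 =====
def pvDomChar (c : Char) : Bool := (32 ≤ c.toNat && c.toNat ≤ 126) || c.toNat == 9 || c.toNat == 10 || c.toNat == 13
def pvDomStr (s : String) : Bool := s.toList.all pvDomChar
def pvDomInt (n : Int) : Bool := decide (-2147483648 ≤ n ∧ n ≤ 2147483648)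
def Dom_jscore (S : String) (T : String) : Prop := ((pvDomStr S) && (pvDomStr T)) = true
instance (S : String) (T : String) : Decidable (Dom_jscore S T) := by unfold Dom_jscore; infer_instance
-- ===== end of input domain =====

-- B replaces A's per-alphabet-character scans of S and T by one counting pass over each string
-- and a multiset-intersection sum over the characters actually present (objective: alternative algorithm).


-- ===== PORT A =====
-- the fixed alphabet literal from A
def pvCharsA : String := "QWERTYUIOPASDFGHJKLZXCVBNMqwertyuiopasdfghjklzxcvbnm1234567890!@#$%^&*()_+[]'/{}?.,<>`~=-"

-- S=str(S) / T=str(T) are identities on str inputs and are dropped.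
def jscore (S : String) (T : String) : Int :=
  let characters := pvCharsA
  let ls : Int := PySem.Str.len characters
  (PySem.List.pyRange 0 ls).foldl
    (fun count i =>
      match PySem.Str.pyGet? characters i with
      | none => count          -- unreachable: 0 ≤ i < ls, Python never raises here
      | some character =>
        let cS : Int := (PySem.Str.count S (String.ofList [character]) : Int)
        let cT : Int := (PySem.Str.count T (String.ofList [character]) : Int)
        if cS ≤ cT then count + cS else count + cT)
    0

-- ===== PORT B =====
-- the same alphabet literal as it appears in Source B
def pvCharsB : String := "QWERTYUIOPASDFGHJKLZXCVBNMqwertyuiopasdfghjklzxcvbnm1234567890!@#$%^&*()_+[]'/{}?.,<>`~=-"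

def jscore_alt (S : String) (T : String) : Int :=
  let allowed : PySem.Set Char := PySem.Set.ofList pvCharsB.toList
  let cS : PySem.Dict Char Int :=
    S.toList.foldl
      (fun d ch => if allowed.contains ch then d.insert ch (d.getD ch 0 + 1) else d)
      PySem.Dict.empty
  let cT : PySem.Dict Char Int :=
    T.toList.foldl
      (fun d ch => if allowed.contains ch then d.insert ch (d.getD ch 0 + 1) else d)
      PySem.Dict.empty
  (cS.items.map (fun p => min p.2 (cT.getD p.1 0))).sum

-- ===== PRECONDITION & SPEC =====
def Spec_jscore (S : String) (T : String) (out : Int) : Prop := out = jscore_alt S T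
instance (S : String) (T : String) (out : Int) : Decidable (Spec_jscore S T out) := by unfold Spec_jscore; infer_instance

-- ===== CLAIM (what is proved, stated in full; the proofs are below) =====
def Claim_equal_jscore : Prop := ∀ (S : String) (T : String), Dom_jscore S T → Spec_jscore S T (jscore S T)

-- ===== LEMMAS AND PROOFS =====

-- the common min-term both sides sum
def pvG (S T : String) (c : Char) : Int :=
  min ((S.toList.count c : Int)) ((T.toList.count c : Int))

-- counting a single-character substring is counting that character
lemma count_go_singleton (c : Char) :
    ∀ (s : List Char) (fuel acc : Nat), s.length ≤ fuel →
      PySem.Chars.count.go [c] fuel s acc = acc + s.count c := by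
  intro s
  induction s with
  | nil =>
    intro fuel acc _
    cases fuel <;> simp [PySem.Chars.count.go]
  | cons h t ih =>
    intro fuel acc hf
    cases fuel with
    | zero => simp at hf
    | succ f =>
      rw [PySem.Chars.count.go]
      by_cases hce : c = h
      · subst hce
        simp only [List.isPrefixOf, BEq.rfl, if_true, Bool.and_self,
          List.length_singleton, List.drop_succ_cons, List.drop_zero]
        rw [ih f (acc+1) (by simpa using hf)]
        simp
        omega
      · have hpf : ([c].isPrefixOf (h :: t)) = false := by
          simp [List.isPrefixOf]
          exact hce
        simp only [hpf, Bool.false_eq_true, if_false]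
        rw [ih f acc (by simpa using hf)]
        simp [List.count_cons]
        exact fun hc => hce hc.symm

lemma str_count_singleton (s : String) (c : Char) :
    PySem.Str.count s (String.ofList [c]) = s.toList.count c := by
  rw [PySem.Str.count_eq]
  simp [PySem.Chars.count]
  rw [count_go_singleton c s.toList _ 0 (le_of_eq (by simp))]
  simp

lemma set_contains_ofList (l : List Char) (c : Char) :
    (PySem.Set.ofList l).contains c = l.contains c := by
  by_cases h : c ∈ l <;> simp [PySem.Set.mem_ofList, h]

-- A computes the sum of pvG over the alphabet
lemma jscore_eq_sum (S T : String) :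
    jscore S T = (pvCharsA.toList.map (pvG S T)).sum := by
  have hmem : ∀ (acc : Int), ∀ j ∈ PySem.List.pyRange 0 (PySem.Str.len pvCharsA),
      (match PySem.Str.pyGet? pvCharsA j with
       | none => acc
       | some character =>
         let cS : Int := (PySem.Str.count S (String.ofList [character]) : Int)
         let cT : Int := (PySem.Str.count T (String.ofList [character]) : Int)
         if cS ≤ cT then acc + cS else acc + cT)
      = acc + pvG S T (PySem.List.pyGetD pvCharsA.toList j ' ') := by
    intro acc j hj
    rw [PySem.List.mem_pyRange_one] at hj
    obtain ⟨k, rfl⟩ : ∃ k : Nat, j = (k : Int) := ⟨j.toNat, (Int.toNat_of_nonneg hj.1).symm⟩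
    have hk : k < pvCharsA.toList.length := by
      have h2 := hj.2
      rw [PySem.Str.len_eq] at h2
      exact_mod_cast h2
    rw [PySem.Str.pyGet?_natCast, PySem.List.pyGetD_natCast,
        List.getElem?_eq_getElem hk, List.getD_eq_getElem _ _ hk]
    simp only [str_count_singleton, pvG, min_def]
    split_ifs <;> rfl
  simp only [jscore]
  rw [PySem.List.foldl_congr_mem _ _
        (fun acc j => acc + pvG S T (PySem.List.pyGetD pvCharsA.toList j ' ')) 0 hmem]
  have hlen : PySem.Str.len pvCharsA = PySem.List.len pvCharsA.toList := by
    simp [PySem.List.len, PySem.Str.len_eq]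
  rw [hlen, PySem.List.foldl_pyRange_pyGetD pvCharsA.toList ' '
        (fun acc c => acc + pvG S T c) 0 le_rfl]
  simp only [Int.toNat_zero, List.drop_zero]
  rw [PySem.List.foldl_add]
  simp

-- B computes the sum of pvG over the distinct alphabet characters of S
lemma jscore_alt_eq_sum (S T : String) :
    jscore_alt S T =
      ((PySem.Set.ofList (S.toList.filter (fun c => pvCharsB.toList.contains c))).map (pvG S T)).sum := by
  simp only [jscore_alt, set_contains_ofList, ← List.foldl_filter]
  set fS := S.toList.filter (fun c => pvCharsB.toList.contains c) with hfS
  set fT := T.toList.filter (fun c => pvCharsB.toList.contains c) with hfT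
  set cS := fS.foldl (fun d ch => d.insert ch (d.getD ch 0 + 1)) (PySem.Dict.empty : PySem.Dict Char Int) with hcS
  set cT := fT.foldl (fun d ch => d.insert ch (d.getD ch 0 + 1)) (PySem.Dict.empty : PySem.Dict Char Int) with hcT
  have hkeys : cS.keys = PySem.Set.ofList fS := by
    rw [hcS, PySem.Dict.keys_foldl_insert]
    rfl
  have hnd : cS.keys.Nodup := by
    rw [hkeys]; exact PySem.Set.nodup_ofList _
  rw [PySem.Dict.items_eq_map_keys cS hnd 0, hkeys, List.map_map]
  apply congrArg
  apply List.map_congr_left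
  intro c hc
  have hcf : c ∈ fS := (PySem.Set.mem_ofList _ _).mp hc
  have hcal : pvCharsB.toList.contains c = true := (List.mem_filter.mp hcf).2
  have hgS : cS.getD c 0 = (fS.count c : Int) := by
    rw [hcS, PySem.Dict.getD_foldl_insert_add_one]
    simp [PySem.Dict.empty, PySem.Dict.getD, PySem.Dict.get?]
  have hgT : cT.getD c 0 = (fT.count c : Int) := by
    rw [hcT, PySem.Dict.getD_foldl_insert_add_one]
    simp [PySem.Dict.empty, PySem.Dict.getD, PySem.Dict.get?]
  simp only [Function.comp, hgS, hgT, hfS, hfT, List.count_filter hcal, pvG]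

-- dropping the alphabet characters absent from S drops only zero terms
lemma sum_restrict (g : Char → Int) (l1 l2 : List Char)
    (h1 : l1.Nodup) (h2 : l2.Nodup)
    (hsub : ∀ c ∈ l2, c ∈ l1)
    (hzero : ∀ c ∈ l1, c ∉ l2 → g c = 0) :
    (l1.map g).sum = (l2.map g).sum := by
  have hsplit := (List.filter_append_perm (fun c => decide (c ∈ l2)) l1).map g
  rw [← hsplit.sum_eq, List.map_append, List.sum_append]
  have hz : ((l1.filter (fun c => !decide (c ∈ l2))).map g).sum = 0 := by
    apply List.sum_eq_zero
    intro x hx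
    obtain ⟨c, hc, rfl⟩ := List.mem_map.mp hx
    have := List.mem_filter.mp hc
    exact hzero c this.1 (by simpa using this.2)
  rw [hz, add_zero]
  have hperm : List.Perm (l1.filter (fun c => decide (c ∈ l2))) l2 := by
    apply List.perm_of_nodup_nodup_toFinset_eq (h1.filter _) h2
    ext x
    simp only [List.mem_toFinset, List.mem_filter, decide_eq_true_eq]
    exact ⟨fun h => h.2, fun h => ⟨hsub x h, h⟩⟩
  exact (hperm.map g).sum_eq

-- ===== VERDICT (by name: the statement is the Claim_ definition above) =====
theorem jscore_spec : Claim_equal_jscore := by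
  intro S T _
  unfold Spec_jscore
  rw [jscore_eq_sum, jscore_alt_eq_sum]
  have hBA : pvCharsB = pvCharsA := rfl
  apply sum_restrict
  · decide
  · exact PySem.Set.nodup_ofList _
  · intro c hc
    have hcf := (PySem.Set.mem_ofList _ _).mp hc
    have := (List.mem_filter.mp hcf).2
    rw [hBA] at this
    simpa using this
  · intro c hcal hnc
    have hcount : S.toList.count c = 0 := by
      rw [List.count_eq_zero]
      intro hcS
      apply hnc
      rw [PySem.Set.mem_ofList]
      exact List.mem_filter.mpr ⟨hcS, by rw [hBA]; simpa using hcal⟩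
    simp only [pvG, hcount, Nat.cast_zero]
    omega
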